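-- pv_equiv track=rewrite | github.com/vmazurovskiy/autoorder-secretmagic | src/services/geocoder.py | _parse_components
-- ===== SOURCE A (Python) =====
-- def _parse_components(components: list[dict[str, str]]) -> dict[str, str | None]:
--     """Парсинг массива Components из Yandex API."""
--     result: dict[str, str | None] = {
--         "country": None,
--         "province": None,
--         "locality": None,
--         "district": None,
--         "street": None,
--         "house": None,
--     }
--
--     for component in components:
--         kind = component.get("kind")
--         name = component.get("name")
--         if kind in result:
--             result[kind] = name
--
--     return result
-- ===== SOURCE B (Python) =====
-- def _parse_components(components):
--     """B: per-key reversed scan — for each of the six fields take the name of the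
--     last component with that kind (no accumulator dict at all)."""
--     rev = list(reversed(components))
--     return {key: next((c.get("name") for c in rev if c.get("kind") == key), None)
--             for key in ("country", "province", "locality", "district", "street", "house")}
-- ===== Notes on version B (the rewrite author's own statement) =====
-- stated objective: alternative
-- what changed: Drops A's mutable result dict and single forward pass: B does six independent reversed-order searches, taking for each fixed field the name of the last component of that kind (first match in the reversed list), then assembles the result directly.
import Mathlib
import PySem

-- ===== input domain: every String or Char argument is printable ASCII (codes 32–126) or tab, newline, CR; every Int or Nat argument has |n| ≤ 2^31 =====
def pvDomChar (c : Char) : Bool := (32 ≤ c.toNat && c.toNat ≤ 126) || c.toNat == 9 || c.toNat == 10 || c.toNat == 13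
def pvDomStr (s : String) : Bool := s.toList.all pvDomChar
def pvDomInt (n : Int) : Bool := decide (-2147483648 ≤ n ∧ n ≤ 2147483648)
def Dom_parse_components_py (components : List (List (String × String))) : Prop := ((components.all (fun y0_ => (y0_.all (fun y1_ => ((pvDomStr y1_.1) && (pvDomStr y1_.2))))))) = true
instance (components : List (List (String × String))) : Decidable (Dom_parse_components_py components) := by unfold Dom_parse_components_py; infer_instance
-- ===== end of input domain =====

-- B replaces A's mutable result dict and single forward pass by six independent
-- reversed-order searches (last component of each kind wins); no speed claim.

-- ===== PORT A =====
-- dict.get(k) on a Python dict passed in (first/unique key wins in an assoc list)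
def pvGet (comp : List (String × String)) (k : String) : Option String :=
  (comp.find? (fun p => p.1 == k)).map (·.2)

def pvInitResult : PySem.Dict String (Option String) :=
  PySem.Dict.mk [("country", none), ("province", none), ("locality", none),
                 ("district", none), ("street", none), ("house", none)]

def pvStepA (res : PySem.Dict String (Option String)) (component : List (String × String)) :
    PySem.Dict String (Option String) :=
  let kind := pvGet component "kind"
  let name := pvGet component "name"
  match kind with
  | some k => if res.contains k then res.insert k name else res  -- "kind in result"; None is never a key
  | none => res

def parse_components_py (components : List (List (String × String))) : List (String × Option String) :=
  (components.foldl pvStepA pvInitResult).items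

-- ===== PORT B =====
def pvSixKeys : List String := ["country", "province", "locality", "district", "street", "house"]

-- next((c.get("name") for c in rev if c.get("kind") == key), None)
def pvLastName (rev : List (List (String × String))) (key : String) : Option String :=
  match rev.find? (fun c => pvGet c "kind" == some key) with
  | some c => pvGet c "name"
  | none => none

def parse_components_py_alt (components : List (List (String × String))) : List (String × Option String) :=
  let rev := components.reverse
  pvSixKeys.map (fun key => (key, pvLastName rev key))

-- ===== PRECONDITION & SPEC =====
def Spec_parse_components_py (components : List (List (String × String))) (out : List (String × Option String)) : Prop := out = parse_components_py_alt components
instance (components : List (List (String × String))) (out : List (String × Option String)) : Decidable (Spec_parse_components_py components out) := by unfold Spec_parse_components_py; infer_instance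

-- ===== CLAIM (what is proved, stated in full; the proofs are below) =====
def Claim_equal_parse_components_py : Prop := ∀ (components : List (List (String × String))), Dom_parse_components_py components → Spec_parse_components_py components (parse_components_py components)

-- ===== LEMMAS AND PROOFS =====
-- A's fold over `res` equals, at each of the six keys, the first match in the
-- reversed component list (or the incoming value when no component has that kind).
lemma pv_invariant (comps : List (List (String × String)))
    (res : PySem.Dict String (Option String))
    (hkeys : res.keys = pvSixKeys) :
    (comps.foldl pvStepA res).keys = pvSixKeys ∧
      ∀ k ∈ pvSixKeys, (comps.foldl pvStepA res).getD k none =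
        match comps.reverse.find? (fun c => pvGet c "kind" == some k) with
        | some c => pvGet c "name"
        | none => res.getD k none := by
  induction comps generalizing res with
  | nil => exact ⟨hkeys, by intro k _; simp⟩
  | cons c rest ih =>
    have hkeys' : (pvStepA res c).keys = pvSixKeys := by
      unfold pvStepA
      cases hk : pvGet c "kind" with
      | none => simpa using hkeys
      | some k0 =>
        simp only []
        by_cases hc : res.contains k0 = true
        · simp only [hc, if_true]
          rw [PySem.Dict.keys_insert_of_contains _ _ hc, hkeys]
        · simp [hc, hkeys]
    obtain ⟨h1, h2⟩ := ih (pvStepA res c) hkeys'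
    refine ⟨by simpa using h1, ?_⟩
    intro k hkmem
    simp only [List.foldl_cons]
    rw [h2 k hkmem]
    rw [List.reverse_cons, List.find?_append]
    cases hf : rest.reverse.find? (fun c => pvGet c "kind" == some k) with
    | some c' => simp
    | none =>
      simp only [Option.none_or]
      unfold pvStepA
      cases hk : pvGet c "kind" with
      | none => simp [hk]
      | some k0 =>
        simp only []
        by_cases hkk : k0 = k
        · subst hkk
          have hc : res.contains k0 = true := by
            rw [PySem.Dict.contains_eq_decide_mem_keys, hkeys]
            simpa using hkmem
          simp [hc, hk]
        · have hne : ((pvGet c "kind" == some k) : Bool) = false := by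
            simp [hk]; exact fun h => hkk h
          simp only [List.find?_cons, hne, List.find?_nil]
          by_cases hc : res.contains k0 = true
          · simp only [hc, if_true]
            rw [PySem.Dict.getD_insert]
            simp [Ne.symm hkk]
          · simp [hc]

-- ===== VERDICT (by name: the statement is the Claim_ definition above) =====
theorem parse_components_py_spec : Claim_equal_parse_components_py := by
  intro components _
  unfold Spec_parse_components_py parse_components_py parse_components_py_alt
  obtain ⟨hkeys, hpt⟩ := pv_invariant components pvInitResult (by decide)
  have hnd : (components.foldl pvStepA pvInitResult).keys.Nodup := by
    rw [hkeys]; decide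
  rw [PySem.Dict.items_eq_map_keys _ hnd (none : Option String), hkeys]
  apply List.map_congr_left
  intro k hk
  have := hpt k hk
  rw [this]
  unfold pvLastName
  cases hf : components.reverse.find? (fun c => pvGet c "kind" == some k) with
  | some c => simp
  | none =>
    simp only []
    have : pvInitResult.getD k none = none := by
      fin_cases hk <;> decide
    simp [this]
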